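-- pv_equiv track=rewrite | github.com/tommdim/homeworks-and-projects | hw/2-poem_analyzer/untitled22.py | lista_prosodia
-- ===== SOURCE A (Python) =====
-- def lista_prosodia(escount, finali):
--     tuples = list(zip(escount,finali))
--     number = 0
--     dic = {}
--     for tupla in list(dict.fromkeys(tuples)):
--         dic[tupla] = number
--         number += 1
--     prosodia = [dic[tupla] for tupla in tuples]
--     return prosodia
-- ===== SOURCE B (Python) =====
-- def lista_prosodia(escount, finali):
--     dic = {}
--     prosodia = []
--     for tupla in zip(escount, finali):
--         if tupla not in dic:
--             dic[tupla] = len(dic)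
--         prosodia.append(dic[tupla])
--     return prosodia
-- ===== Notes on version B (the rewrite author's own statement) =====
-- stated objective: simpler
-- what changed: A makes three passes (dict.fromkeys dedup, a separate id-assignment loop, then a lookup comprehension); B makes one fused pass over zip(escount, finali) that assigns a fresh id the first time a tuple is seen and appends the id immediately.
import Mathlib
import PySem

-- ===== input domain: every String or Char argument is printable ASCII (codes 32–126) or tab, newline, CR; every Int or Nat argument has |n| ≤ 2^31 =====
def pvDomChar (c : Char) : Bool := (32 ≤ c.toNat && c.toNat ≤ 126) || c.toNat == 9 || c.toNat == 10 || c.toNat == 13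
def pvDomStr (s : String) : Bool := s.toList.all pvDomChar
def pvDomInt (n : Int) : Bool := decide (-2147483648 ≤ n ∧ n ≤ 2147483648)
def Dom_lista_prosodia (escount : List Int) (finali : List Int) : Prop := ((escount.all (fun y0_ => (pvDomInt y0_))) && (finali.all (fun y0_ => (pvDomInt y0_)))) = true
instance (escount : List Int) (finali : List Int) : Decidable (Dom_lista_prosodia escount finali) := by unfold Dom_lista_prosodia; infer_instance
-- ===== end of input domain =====

-- B fuses A's three passes (dict.fromkeys dedup, id-assignment loop, lookup comprehension)
-- into one traversal that assigns ids on first sight; objective: simpler (one pass), same values.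


-- ===== PORT A =====
def lista_prosodia (escount : List Int) (finali : List Int) : List Int :=
  let tuples := escount.zip finali
  -- for tupla in list(dict.fromkeys(tuples)): dic[tupla] = number; number += 1
  let st := (PySem.List.dedup tuples).foldl
    (fun (st : PySem.Dict (Int × Int) Int × Int) tupla => (st.1.insert tupla st.2, st.2 + 1))
    (PySem.Dict.empty, 0)
  -- dic[tupla]: the key is always present (tupla ∈ dedup tuples), so getD 0 is exact here
  tuples.map (fun tupla => st.1.getD tupla 0)

-- ===== PORT B =====
def lista_prosodia_alt (escount : List Int) (finali : List Int) : List Int :=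
  ((escount.zip finali).foldl
    (fun (st : PySem.Dict (Int × Int) Int × List Int) tupla =>
      let dic := if st.1.contains tupla then st.1 else st.1.insert tupla st.1.size
      (dic, st.2 ++ [dic.getD tupla 0]))
    (PySem.Dict.empty, [])).2

-- ===== PRECONDITION & SPEC =====
def Spec_lista_prosodia (escount : List Int) (finali : List Int) (out : List Int) : Prop := out = lista_prosodia_alt escount finali
instance (escount : List Int) (finali : List Int) (out : List Int) : Decidable (Spec_lista_prosodia escount finali out) := by unfold Spec_lista_prosodia; infer_instance

-- ===== CLAIM (what is proved, stated in full; the proofs are below) =====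
def Claim_equal_lista_prosodia : Prop := ∀ (escount : List Int) (finali : List Int), Dom_lista_prosodia escount finali → Spec_lista_prosodia escount finali (lista_prosodia escount finali)

-- ===== LEMMAS AND PROOFS =====

-- A's id-assignment fold: looking up t yields (start index + position of t) when t occurs.
theorem pv_A_fold (ks : List (Int × Int)) (hnd : ks.Nodup) :
    ∀ (d : PySem.Dict (Int × Int) Int) (n : Int) (t : Int × Int),
      ((ks.foldl (fun (st : PySem.Dict (Int × Int) Int × Int) tupla =>
          (st.1.insert tupla st.2, st.2 + 1)) (d, n)).1).get? t
        = if t ∈ ks then some (n + (ks.idxOf t : Int)) else d.get? t := by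
  induction ks with
  | nil => intro d n t; simp
  | cons k rest ih =>
    intro d n t
    have hnd' : rest.Nodup := hnd.of_cons
    rw [List.foldl_cons, ih hnd']
    by_cases hk : t = k
    · subst hk
      have : t ∉ rest := (List.nodup_cons.mp hnd).1
      simp [this, PySem.Dict.get?_insert_self]
    · by_cases hr : t ∈ rest
      · simp only [hr, if_true, List.mem_cons, hk, or_true]
        have : (k :: rest).idxOf t = rest.idxOf t + 1 := by
          simp [Ne.symm hk]
        rw [this]
        push_cast
        ring_nf
      · simp only [hr, if_false, List.mem_cons, hk, or_self]
        exact PySem.Dict.get?_insert_of_ne _ _ hk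

theorem pv_add_mem (s : List (Int × Int)) (x : Int × Int) (h : x ∈ s) :
    PySem.Set.add s x = s := by
  simp [PySem.Set.add, h]

theorem pv_add_not_mem (s : List (Int × Int)) (x : Int × Int) (h : x ∉ s) :
    PySem.Set.add s x = s ++ [x] := by
  simp [PySem.Set.add, h]

-- PySem.Set.add only ever appends, so a fold of adds keeps the start as a prefix.
theorem pv_foldl_add_prefix (q : List (Int × Int)) :
    ∀ (s : PySem.Set (Int × Int)), s <+: q.foldl PySem.Set.add s := by
  induction q with
  | nil => intro s; simp
  | cons x xs ih =>
    intro s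
    refine List.IsPrefix.trans ?_ (ih (PySem.Set.add s x))
    simp only [PySem.Set.add]
    split
    · exact List.prefix_refl s
    · exact List.prefix_append s [x]

theorem pv_ofList_prefix (p q : List (Int × Int)) :
    PySem.Set.ofList p <+: PySem.Set.ofList (p ++ q) := by
  simp only [PySem.Set.ofList_eq_foldl, List.foldl_append]
  exact pv_foldl_add_prefix q _

theorem pv_idxOf_ofList_stable (p q : List (Int × Int)) (t : Int × Int) (ht : t ∈ p) :
    (PySem.Set.ofList (p ++ q)).idxOf t = (PySem.Set.ofList p).idxOf t := by
  obtain ⟨u, hu⟩ := pv_ofList_prefix p q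
  rw [← hu]
  exact List.idxOf_append_of_mem (by simpa [PySem.Set.mem_ofList] using ht)

theorem pv_ofList_snoc_not_mem (p : List (Int × Int)) (r : Int × Int) (h : r ∉ p) :
    PySem.Set.ofList (p ++ [r]) = PySem.Set.ofList p ++ [r] := by
  simp only [PySem.Set.ofList_eq_foldl, List.foldl_append, List.foldl_cons, List.foldl_nil]
  rw [← PySem.Set.ofList_eq_foldl]
  exact pv_add_not_mem _ r (by simpa [PySem.Set.mem_ofList] using h)

-- a duplicate occurrence in the middle does not change the dedup list
theorem pv_ofList_middle_mem (p rs : List (Int × Int)) (r : Int × Int) (h : r ∈ p) :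
    PySem.Set.ofList (p ++ r :: rs) = PySem.Set.ofList (p ++ rs) := by
  simp only [PySem.Set.ofList_eq_foldl, List.foldl_append, List.foldl_cons]
  rw [show List.foldl PySem.Set.add [] p = PySem.Set.ofList p from (PySem.Set.ofList_eq_foldl p).symm,
    pv_add_mem _ r (by simpa [PySem.Set.mem_ofList] using h)]

-- B's fused loop: processing `rest` after having seen `p` emits positions in set(p ++ rest).
theorem pv_B_fold (rest : List (Int × Int)) :
    ∀ (p : List (Int × Int)) (d : PySem.Dict (Int × Int) Int) (acc : List Int),
      d.keys = PySem.Set.ofList p →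
      (∀ t : Int × Int, d.get? t = if t ∈ p then some ((PySem.Set.ofList p).idxOf t : Int) else none) →
      (rest.foldl (fun (st : PySem.Dict (Int × Int) Int × List Int) tupla =>
          let dic := if st.1.contains tupla then st.1 else st.1.insert tupla st.1.size
          (dic, st.2 ++ [dic.getD tupla 0])) (d, acc)).2
        = acc ++ rest.map (fun t => ((PySem.Set.ofList (p ++ rest)).idxOf t : Int)) := by
  induction rest with
  | nil => intro p d acc _ _; simp
  | cons r rs ih =>
    intro p d acc hk hg
    have hsize : d.size = (PySem.Set.ofList p).length := by
      have := congrArg List.length hk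
      simpa [PySem.Dict.keys, PySem.Dict.size] using this
    have hcont : d.contains r = true ↔ r ∈ p := by
      rw [PySem.Dict.contains_iff_mem_keys d r, hk, PySem.Set.mem_ofList]
    rw [List.foldl_cons]
    by_cases hr : r ∈ p
    -- seen before: dict unchanged, emit the existing id
    · have hc : d.contains r = true := hcont.mpr hr
      simp only [hc, if_true]
      rw [ih p d (acc ++ [d.getD r 0]) hk hg]
      have hval : d.getD r 0 = ((PySem.Set.ofList (p ++ r :: rs)).idxOf r : Int) := by
        rw [PySem.Dict.getD_eq_get?_getD, hg r]
        rw [pv_idxOf_ofList_stable p (r :: rs) r hr]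
        simp [hr]
      rw [hval, pv_ofList_middle_mem p rs r hr]
      simp [List.append_assoc]
    -- fresh: insert with id = current size, emit it
    · have hc : d.contains r = false := by
        rw [← Bool.not_eq_true, hcont]; exact hr
      simp only [hc, Bool.false_eq_true, if_false]
      have hstep : PySem.Set.ofList (p ++ [r]) = PySem.Set.ofList p ++ [r] :=
        pv_ofList_snoc_not_mem p r hr
      have hk' : (d.insert r (d.size : Int)).keys = PySem.Set.ofList (p ++ [r]) := by
        rw [PySem.Dict.keys_insert_of_not_contains d _ hc, hk, hstep]
      have hg' : ∀ t : Int × Int, (d.insert r (d.size : Int)).get? t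
          = if t ∈ p ++ [r] then some ((PySem.Set.ofList (p ++ [r])).idxOf t : Int) else none := by
        intro t
        by_cases htr : t = r
        · subst htr
          rw [PySem.Dict.get?_insert_self, hstep]
          have hidx : (PySem.Set.ofList p ++ [t]).idxOf t = (PySem.Set.ofList p).length := by
            rw [List.idxOf_append_of_notMem (by simpa [PySem.Set.mem_ofList] using hr),
              List.idxOf_cons_self]
            omega
          rw [hidx, hsize]
          simp
        · rw [PySem.Dict.get?_insert_of_ne _ _ htr, hg t, hstep]
          by_cases htp : t ∈ p
          · have hidx : (PySem.Set.ofList p ++ [r]).idxOf t = (PySem.Set.ofList p).idxOf t :=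
              List.idxOf_append_of_mem (by simpa [PySem.Set.mem_ofList] using htp)
            rw [hidx]
            simp [htp]
          · simp [htp, htr]
      rw [ih (p ++ [r]) (d.insert r (d.size : Int)) _ hk' hg']
      have hd : PySem.Set.ofList ((p ++ [r]) ++ rs) = PySem.Set.ofList (p ++ r :: rs) := by
        rw [show (p ++ [r]) ++ rs = p ++ r :: rs from by simp]
      have hval : (d.insert r (d.size : Int)).getD r 0
          = ((PySem.Set.ofList (p ++ r :: rs)).idxOf r : Int) := by
        rw [PySem.Dict.getD_eq_get?_getD, hg' r]
        have hmem : r ∈ p ++ [r] := by simp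
        have hst : (PySem.Set.ofList ((p ++ [r]) ++ rs)).idxOf r = (PySem.Set.ofList (p ++ [r])).idxOf r :=
          pv_idxOf_ofList_stable (p ++ [r]) rs r hmem
        simp only [hmem, if_true, Option.getD_some]
        rw [← hd, hst]
      rw [hval, hd]
      simp [List.append_assoc]

-- ===== VERDICT (by name: the statement is the Claim_ definition above) =====
theorem lista_prosodia_spec : Claim_equal_lista_prosodia := by
  intro escount finali _
  unfold Spec_lista_prosodia lista_prosodia lista_prosodia_alt
  set tuples := escount.zip finali with htuples
  rw [pv_B_fold tuples [] PySem.Dict.empty [] (by simp) (by simp)]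
  simp only [List.nil_append]
  apply List.map_congr_left
  intro t ht
  rw [PySem.Dict.getD_eq_get?_getD,
    pv_A_fold (PySem.List.dedup tuples)
      (by simp only [PySem.List.dedup_eq_ofList]; exact PySem.Set.nodup_ofList tuples)
      PySem.Dict.empty 0 t]
  simp [ht, PySem.List.dedup_eq_ofList]
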